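-- pv_equiv track=rewrite | github.com/Rifa-Tasfiya/CSE220-Assignments- | Array/linearArray.py | count_repetition
-- ===== SOURCE A (Python) =====
-- def do_sort(arr):
--     for idx in range(len(arr) - 1):
--         min_idx = idx
--         for j in range(idx + 1, len(arr)):
--             if arr[min_idx] < arr[j]:
--                 min_idx = j
--
--         swap(min_idx, idx, arr)
--     return arr
--
-- def swap(i, j, arr):
--     temp = arr[i]
--     arr[i] = arr[j]
--     arr[j] = temp
--
-- def count_repetition(source):
--     size = len(source)
--     do_count_array = [0] * size
--     for i in range(0, size - 1):
--         count = 1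
--         if source[i] != 0:
--             for j in range(i + 1, size):
--                 if source[i] == source[j]:
--                     count += 1
--                     source[j] = 0
--             if count > 1:
--                 do_count_array[i] = count
--     sort_array = do_sort(do_count_array)
--
--     is_sem_repetition = False
--     for i in range(1, len(sort_array)):
--         if sort_array[i - 1] == sort_array[i] and sort_array[i] != 0:
--             is_sem_repetition = True
--             break
--     return is_sem_repetition
-- ===== SOURCE B (Python) =====
-- def count_repetition(source):
--     counts = {}
--     for v in source:
--         if v != 0:
--             counts[v] = counts.get(v, 0) + 1
--     seen = set()
--     for c in counts.values():
--         if c > 1: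
--             if c in seen:
--                 return True
--             seen.add(c)
--     return False
-- ===== Notes on version B (the rewrite author's own statement) =====
-- stated objective: faster
-- what changed: Replaces A's quadratic zero-out self-scan plus hand-written selection sort and adjacent-duplicate scan by one hash-counting pass over the list and one pass over the counts with a 'seen' set of repetition counts; B also does not mutate its argument, while A zeroes out duplicates in place.
import Mathlib
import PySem

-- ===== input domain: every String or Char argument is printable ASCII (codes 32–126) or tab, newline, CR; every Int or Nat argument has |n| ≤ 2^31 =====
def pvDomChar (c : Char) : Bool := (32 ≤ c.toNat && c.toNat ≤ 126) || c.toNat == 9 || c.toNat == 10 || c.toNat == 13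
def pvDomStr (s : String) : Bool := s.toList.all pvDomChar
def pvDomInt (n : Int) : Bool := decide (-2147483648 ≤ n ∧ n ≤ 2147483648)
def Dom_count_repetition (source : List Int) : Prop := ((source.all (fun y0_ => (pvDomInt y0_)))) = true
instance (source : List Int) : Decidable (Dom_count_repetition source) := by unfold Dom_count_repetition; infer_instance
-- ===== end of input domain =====

-- B replaces A's quadratic zero-out self-scan + selection sort by one dict-counting pass and one
-- pass over the counts with a 'seen' set (faster, O(n^2) -> O(n)); equivalence is about the RETURN
-- value only: Python A zeroes out duplicate entries of `source` in place, B does not mutate it.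

-- ===== PORT A =====
-- inner loop of count_repetition at position i: count later occurrences of x and set them to 0
def pvZero (x : Int) : List Int → Int × List Int
  | [] => (0, [])
  | y :: ys =>
      let r := pvZero x ys
      if x = y then (r.1 + 1, 0 :: r.2) else (r.1, y :: r.2)

theorem pvZero_len (x : Int) (l : List Int) : (pvZero x l).2.length = l.length := by
  induction l with
  | nil => rfl
  | cons y ys ih => simp only [pvZero]; split <;> simp [ih]

-- outer loop: for i in range(0, size-1), building do_count_array (unvisited slots stay 0)
def pvOuter : List Int → List Int
  | [] => []
  | [_] => [0]
  | x :: y :: rest =>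
      if x ≠ 0 then
        let r := pvZero x (y :: rest)
        let cnt : Int := 1 + r.1
        (if 1 < cnt then cnt else 0) :: pvOuter r.2
      else 0 :: pvOuter (y :: rest)
  termination_by l => l.length
  decreasing_by
    · simp [pvZero_len]
    · simp

-- inner loop of do_sort: select the (first) maximum, the displaced element takes its place (swap)
def pvSel (x : Int) : List Int → Int × List Int
  | [] => (x, [])
  | y :: ys =>
      if x < y then let r := pvSel y ys; (r.1, x :: r.2)
      else let r := pvSel x ys; (r.1, y :: r.2)

theorem pvSel_len (x : Int) (l : List Int) : (pvSel x l).2.length = l.length := by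
  induction l generalizing x with
  | nil => rfl
  | cons y ys ih => simp only [pvSel]; split <;> simp [ih]

-- do_sort: selection sort into decreasing order
def pvSort : List Int → List Int
  | [] => []
  | x :: xs => let r := pvSel x xs; r.1 :: pvSort r.2
  termination_by l => l.length
  decreasing_by simp [pvSel_len]

-- final loop: adjacent equal nonzero pair (with break)
def pvScan : List Int → Bool
  | x :: y :: r => if x = y ∧ y ≠ 0 then true else pvScan (y :: r)
  | _ => false

def count_repetition (source : List Int) : Bool :=
  pvScan (pvSort (pvOuter source))

-- ===== PORT B =====
def count_repetition_alt (source : List Int) : Bool :=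
  let counts := source.foldl
    (fun (d : PySem.Dict Int Int) v => if v ≠ 0 then d.insert v (d.getD v 0 + 1) else d)
    PySem.Dict.empty
  (counts.values.foldl
    (fun (st : Bool × PySem.Set Int) c =>
      if st.1 then st
      else if 1 < c then
        (if PySem.Set.contains st.2 c then (true, st.2) else (false, PySem.Set.add st.2 c))
      else st)
    (false, PySem.Set.empty)).1

-- ===== PRECONDITION & SPEC =====
def Spec_count_repetition (source : List Int) (out : Bool) : Prop := out = count_repetition_alt source
instance (source : List Int) (out : Bool) : Decidable (Spec_count_repetition source out) := by unfold Spec_count_repetition; infer_instance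

-- ===== CLAIM (what is proved, stated in full; the proofs are below) =====
def Claim_equal_count_repetition : Prop := ∀ (source : List Int), Dom_count_repetition source → Spec_count_repetition source (count_repetition source)

-- ===== LEMMAS AND PROOFS =====
-- abbreviations used by the proofs
def nzf (l : List Int) : List Int := l.filter (fun y => !(y == 0))
def zmap (x : Int) (l : List Int) : List Int := l.map (fun y => if y = x then 0 else y)

theorem pvZero_spec (x : Int) (l : List Int) :
    pvZero x l = ((l.count x : Int), zmap x l) := by
  induction l with
  | nil => simp [pvZero, zmap]
  | cons y ys ih =>
      simp only [pvZero, ih, List.count_cons, zmap, List.map_cons]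
      by_cases h : x = y
      · subst h; simp
      · have h2 : ¬ (y = x) := fun hh => h hh.symm
        simp [h, h2]

-- PySem.Set.add on a cons cell, when the new element differs from the head
theorem set_add_cons (x y : Int) (s : List Int) (h : ¬ y = x) :
    PySem.Set.add (x :: s) y = x :: PySem.Set.add s y := by
  by_cases hm : y ∈ s
  · have h1 : PySem.Set.add (x :: s) y = x :: s := by
      simp [PySem.Set.add, List.mem_cons, hm]
    have h2 : PySem.Set.add s y = s := by simp [PySem.Set.add, hm]
    rw [h1, h2]
  · have h1 : PySem.Set.add (x :: s) y = (x :: s) ++ [y] := by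
      simp only [PySem.Set.add]
      rw [if_neg]
      simp [List.mem_cons, hm, h]
    have h2 : PySem.Set.add s y = s ++ [y] := by
      simp only [PySem.Set.add]
      rw [if_neg]
      simp [hm]
    rw [h1, h2]; rfl

theorem foldl_add_cons (u : List Int) (s : List Int) (x : Int) (h : ∀ y ∈ u, ¬ y = x) :
    u.foldl PySem.Set.add (x :: s) = x :: u.foldl PySem.Set.add s := by
  induction u generalizing s with
  | nil => rfl
  | cons y u ih =>
      simp only [List.foldl_cons]
      rw [set_add_cons x y s (h y (List.mem_cons_self))]
      exact ih _ (fun z hz => h z (List.mem_cons_of_mem _ hz))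

theorem foldl_add_filter (t : List Int) (s : List Int) (x : Int) (h : x ∈ s) :
    t.foldl PySem.Set.add s = (t.filter (fun y => !(y == x))).foldl PySem.Set.add s := by
  induction t generalizing s with
  | nil => rfl
  | cons y t ih =>
      by_cases hy : y = x
      · subst hy
        have : PySem.Set.add s y = s := by simp [PySem.Set.add, h]
        simp only [List.filter_cons, List.foldl_cons, this]
        simpa using ih s h
      · have hmem : x ∈ PySem.Set.add s y := by
          rw [PySem.Set.mem_add]; exact Or.inl h
        simp only [List.filter_cons, List.foldl_cons]
        have : (!(y == x)) = true := by simpa using hy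
        rw [this]
        simpa using ih (PySem.Set.add s y) hmem

theorem ofList_cons_filter (x : Int) (t : List Int) :
    PySem.Set.ofList (x :: t) = x :: PySem.Set.ofList (t.filter (fun y => !(y == x))) := by
  have hadd : PySem.Set.add ([] : List Int) x = [x] := by simp [PySem.Set.add]
  rw [PySem.Set.ofList_eq_foldl, PySem.Set.ofList_eq_foldl]
  simp only [List.foldl_cons, hadd]
  rw [foldl_add_filter t [x] x (List.mem_singleton.mpr rfl)]
  exact foldl_add_cons _ [] x (by intro y hy; simpa using (List.mem_filter.mp hy).2)

theorem zmap_filter (x : Int) (hx : x ≠ 0) (l : List Int) :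
    nzf (zmap x l) = (nzf l).filter (fun y => !(y == x)) := by
  induction l with
  | nil => rfl
  | cons y ys ih =>
      simp only [zmap, nzf, List.map_cons, List.filter_cons] at *
      by_cases h : y = x
      · subst h; simp [hx, ih]
      · by_cases h0 : y = 0 <;> simp [h, h0, ih]

theorem zmap_count (x v : Int) (hv0 : v ≠ 0) (hvx : v ≠ x) (l : List Int) :
    (zmap x l).count v = l.count v := by
  induction l with
  | nil => rfl
  | cons y ys ih =>
      simp only [zmap, List.map_cons, List.count_cons] at *
      by_cases h : y = x
      · subst h; simp [ih, hv0.symm, hvx.symm]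
      · simp [h, ih]

theorem count_nzf (v : Int) (hv : v ≠ 0) (l : List Int) : (nzf l).count v = l.count v := by
  unfold nzf
  exact List.count_filter (by simpa using hv)

-- characterisation of A's first loop: the nonzero entries of do_count_array are the
-- repetition counts (>1) of the distinct nonzero values, in first-occurrence order
theorem outer_spec (l : List Int) :
    (pvOuter l).filter (fun c => !(c == 0)) =
      ((PySem.Set.ofList (nzf l)).map (fun v => (l.count v : Int))).filter
        (fun c => decide (1 < c)) := by
  induction l using pvOuter.induct with
  | case1 => simp [pvOuter, nzf, PySem.Set.ofList]
  | case2 a =>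
      by_cases h : a = 0
      · subst h; simp [pvOuter, nzf]
      · simp [pvOuter, nzf, h, PySem.Set.ofList]
  | case3 x y rest hx r ih =>
      rw [pvOuter.eq_3, if_pos hx]
      have hr : r = ((List.count x (y :: rest) : Int), zmap x (y :: rest)) := by
        rw [show r = pvZero x (y :: rest) from rfl, pvZero_spec]
      simp only [hr] at ih
      simp only [pvZero_spec]
      set restL := y :: rest with hrestL
      have hnz : nzf (x :: restL) = x :: nzf restL := by simp [nzf, hx]
      have hof : PySem.Set.ofList (nzf (x :: restL)) =
          x :: PySem.Set.ofList ((nzf restL).filter (fun y => !(y == x))) := by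
        rw [hnz, ofList_cons_filter]
      have hzf : nzf (zmap x restL) = (nzf restL).filter (fun y => !(y == x)) :=
        zmap_filter x hx restL
      rw [hzf] at ih
      have hmapeq :
          (PySem.Set.ofList ((nzf restL).filter (fun y => !(y == x)))).map
              (fun v => ((zmap x restL).count v : Int)) =
          (PySem.Set.ofList ((nzf restL).filter (fun y => !(y == x)))).map
              (fun v => ((x :: restL).count v : Int)) := by
        apply List.map_congr_left
        intro v hv
        rw [PySem.Set.mem_ofList, List.mem_filter] at hv
        have hv0 : v ≠ 0 := by
          have := List.mem_filter.mp hv.1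
          simpa using this.2
        have hvx : v ≠ x := by simpa using hv.2
        have h2 : (x :: restL).count v = restL.count v := by
          have hxv : ¬ x = v := fun hh => hvx hh.symm
          rw [List.count_cons]
          simp [hxv]
        rw [zmap_count x v hv0 hvx, h2]
      have ihT : (pvOuter (zmap x restL)).filter (fun c => !(c == 0)) =
          ((PySem.Set.ofList ((nzf restL).filter (fun y => !(y == x)))).map
            (fun v => ((x :: restL).count v : Int))).filter (fun c => decide (1 < c)) := by
        rw [ih, hmapeq]
      have hcnt : ((x :: restL).count x : Int) = 1 + (restL.count x : Int) := by
        rw [List.count_cons]; simp [Int.add_comm]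
      rw [hof]
      simp only [List.map_cons, List.filter_cons]
      rw [← hcnt]
      by_cases hcLt : (1 : Int) < ((x :: restL).count x : Int)
      · rw [if_pos hcLt, ihT]
        have hne : ((x :: restL).count x : Int) ≠ 0 := by omega
        rw [if_pos (by simpa using hne), if_pos (decide_eq_true_eq.mpr hcLt)]
      · rw [if_neg hcLt, ihT]
        rw [if_neg (by simp), if_neg (fun hcon => hcLt (of_decide_eq_true hcon))]
  | case4 x y rest hx ih =>
      have hx0 : x = 0 := by simpa using hx
      subst hx0
      rw [pvOuter.eq_3, if_neg (by simp)]
      simp only [List.filter_cons]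
      have hnz : nzf ((0 : Int) :: y :: rest) = nzf (y :: rest) := by simp [nzf]
      rw [hnz]
      have hmapeq :
          (PySem.Set.ofList (nzf (y :: rest))).map (fun v => (((0 : Int) :: y :: rest).count v : Int)) =
          (PySem.Set.ofList (nzf (y :: rest))).map (fun v => ((y :: rest).count v : Int)) := by
        apply List.map_congr_left
        intro v hv
        rw [PySem.Set.mem_ofList] at hv
        have hv0 : v ≠ 0 := by
          have := List.mem_filter.mp hv
          simpa using this.2
        rw [List.count_cons]
        have h0v : ¬ (0 : Int) = v := fun hh => hv0 hh.symm
        simp [h0v]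
      rw [hmapeq, ← ih]
      simp

-- selection (inner loop of do_sort): permutation and maximality
theorem pvSel_perm (x : Int) (l : List Int) :
    List.Perm ((pvSel x l).1 :: (pvSel x l).2) (x :: l) := by
  induction l generalizing x with
  | nil => simp [pvSel]
  | cons y ys ih =>
      simp only [pvSel]
      by_cases h : x < y
      · simp only [if_pos h]
        exact (List.Perm.swap x (pvSel y ys).1 (pvSel y ys).2).trans ((ih y).cons x)
      · simp only [if_neg h]
        exact ((List.Perm.swap y (pvSel x ys).1 (pvSel x ys).2).trans
          ((ih x).cons y)).trans (List.Perm.swap x y ys)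

theorem pvSel_max (x : Int) (l : List Int) : ∀ y ∈ x :: l, y ≤ (pvSel x l).1 := by
  induction l generalizing x with
  | nil =>
      intro y hy
      rcases List.mem_cons.mp hy with rfl | h
      · simp [pvSel]
      · simp at h
  | cons z zs ih =>
      intro y hy
      simp only [pvSel]
      by_cases h : x < z
      · rw [if_pos h]
        have hm : y ∈ z :: zs ∨ y = x := by
          rcases List.mem_cons.mp hy with rfl | hy2
          · exact Or.inr rfl
          · exact Or.inl hy2
        rcases hm with hm | rfl
        · exact ih z y hm
        · exact le_of_lt (lt_of_lt_of_le h (ih z z List.mem_cons_self))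
      · rw [if_neg h]
        have hm : y ∈ x :: zs ∨ y = z := by
          rcases List.mem_cons.mp hy with rfl | hy2
          · exact Or.inl List.mem_cons_self
          · rcases List.mem_cons.mp hy2 with rfl | hy3
            · exact Or.inr rfl
            · exact Or.inl (List.mem_cons_of_mem _ hy3)
        rcases hm with hm | rfl
        · exact ih x y hm
        · exact le_trans (not_lt.mp h) (ih x x List.mem_cons_self)

theorem pvSort_perm (l : List Int) : List.Perm (pvSort l) l := by
  induction l using pvSort.induct with
  | case1 => simp [pvSort]
  | case2 x xs r ih =>
      simp only [pvSort]
      have ih' : List.Perm (pvSort (pvSel x xs).2) (pvSel x xs).2 := ih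
      exact (ih'.cons (pvSel x xs).1).trans (pvSel_perm x xs)

theorem pvSort_sorted (l : List Int) : (pvSort l).Pairwise (fun a b => b ≤ a) := by
  induction l using pvSort.induct with
  | case1 => simp [pvSort]
  | case2 x xs r ih =>
      simp only [pvSort]
      have ih' : (pvSort (pvSel x xs).2).Pairwise (fun a b => b ≤ a) := ih
      refine List.Pairwise.cons ?_ ih'
      intro b hb
      have hb2 : b ∈ (pvSel x xs).2 := (pvSort_perm _).mem_iff.mp hb
      have : b ∈ x :: xs := (pvSel_perm x xs).mem_iff.mp (List.mem_cons_of_mem _ hb2)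
      exact pvSel_max x xs b this

-- the adjacent-equal-nonzero scan on a decreasingly sorted list detects exactly
-- a duplicated nonzero entry
theorem pvScan_iff (l : List Int) (h : l.Pairwise (fun a b => b ≤ a)) :
    pvScan l = true ↔ ¬ (nzf l).Nodup := by
  induction l with
  | nil => simp [pvScan, nzf]
  | cons x t ih =>
      cases t with
      | nil =>
          simp [pvScan, nzf, List.filter_cons]
          split <;> simp
      | cons y r =>
          by_cases hxy : x = y ∧ y ≠ 0
          · constructor
            · intro _
              obtain ⟨rfl, h0⟩ := hxy
              intro hnd
              have : nzf (x :: x :: r) = x :: x :: nzf r := by simp [nzf, h0]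
              rw [this] at hnd
              rcases hnd with _ | hnd
              simp_all
            · intro _; simp [pvScan, hxy]
          · have hscan : pvScan (x :: y :: r) = pvScan (y :: r) := by
              simp [pvScan, hxy]
            have htail := ih (List.Pairwise.sublist (List.sublist_cons_self _ _) h)
            rw [hscan, htail]
            have hxny : x ≠ y ∨ x = 0 := by
              by_cases hx0 : x = 0
              · exact Or.inr hx0
              · left; intro he
                exact hxy ⟨he, by rintro rfl; exact hx0 he⟩
            constructor
            · intro hnd hnd2
              apply hnd
              by_cases hx0 : x = 0
              · subst hx0
                have : nzf ((0 : Int) :: y :: r) = nzf (y :: r) := by simp [nzf]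
                rwa [this] at hnd2
              · have : nzf (x :: y :: r) = x :: nzf (y :: r) := by simp [nzf, hx0]
                rw [this] at hnd2
                exact hnd2.sublist (List.sublist_cons_self _ _)
            · intro hnd hnd2
              apply hnd
              by_cases hx0 : x = 0
              · subst hx0
                have : nzf ((0 : Int) :: y :: r) = nzf (y :: r) := by simp [nzf]
                rw [this]; exact hnd2
              · have heq : nzf (x :: y :: r) = x :: nzf (y :: r) := by simp [nzf, hx0]
                rw [heq]
                refine List.Nodup.cons ?_ hnd2
                intro hmem
                have hxney : x ≠ y := by
                  rcases hxny with h' | h'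
                  · exact h'
                  · exact absurd h' hx0
                have hxr : x ∈ r := by
                  have := List.mem_filter.mp hmem
                  rcases List.mem_cons.mp this.1 with h' | h'
                  · exact absurd h' hxney
                  · exact h'
                have h1 : x ≤ y := by
                  have := (List.pairwise_cons.mp (List.pairwise_cons.mp h).2).1
                  exact this x hxr
                have h2 : y ≤ x := (List.pairwise_cons.mp h).1 y List.mem_cons_self
                exact hxney (le_antisymm h1 h2)

-- B side: the guarded counting fold is the counter of the nonzero entries
theorem foldl_if_filter (l : List Int) (d : PySem.Dict Int Int) :
    l.foldl (fun d v => if v ≠ 0 then d.insert v (d.getD v 0 + 1) else d) d =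
      (nzf l).foldl (fun d v => d.insert v (d.getD v 0 + 1)) d := by
  induction l generalizing d with
  | nil => rfl
  | cons v vs ih =>
      simp only [List.foldl_cons]
      by_cases h : v = 0
      · rw [show (if v ≠ 0 then d.insert v (d.getD v 0 + 1) else d) = d from if_neg (by simp [h])]
        rw [ih, show nzf (v :: vs) = nzf vs from by simp [nzf, h]]
      · rw [show (if v ≠ 0 then d.insert v (d.getD v 0 + 1) else d) = d.insert v (d.getD v 0 + 1)
            from if_pos h]
        rw [ih, show nzf (v :: vs) = v :: nzf vs from by simp [nzf, h]]
        rfl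

def bstep : Bool × PySem.Set Int → Int → Bool × PySem.Set Int := fun st c =>
  if st.1 then st
  else if 1 < c then
    (if PySem.Set.contains st.2 c then (true, st.2) else (false, PySem.Set.add st.2 c))
  else st

theorem bloop_true (vals : List Int) (S : PySem.Set Int) :
    vals.foldl bstep (true, S) = (true, S) := by
  induction vals with
  | nil => rfl
  | cons c vs ih => simpa [bstep] using ih

theorem bloop_spec (vals : List Int) (S : List Int) (h : S.Nodup) :
    (vals.foldl bstep (false, S)).1 =
      !decide ((S ++ vals.filter (fun c => decide (1 < c))).Nodup) := by
  induction vals generalizing S with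
  | nil => simp [h]
  | cons c vs ih =>
      simp only [List.foldl_cons, List.filter_cons]
      by_cases hc : (1 : Int) < c
      · rw [if_pos (decide_eq_true_eq.mpr hc)]
        by_cases hm : c ∈ S
        · have hstep : bstep (false, S) c = (true, S) := by simp [bstep, hc, hm]
          rw [hstep, bloop_true]
          have hnotnodup : ¬ (S ++ c :: vs.filter (fun c => decide (1 < c))).Nodup := by
            intro hnd
            exact (List.disjoint_of_nodup_append hnd) hm List.mem_cons_self
          simp [hnotnodup]
        · have hstep : bstep (false, S) c = (false, S ++ [c]) := by
            simp [bstep, hc, hm]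
          rw [hstep]
          have hnd : (S ++ [c]).Nodup := by
            have hdisj : S.Disjoint [c] := by
              intro a ha hac
              rw [List.mem_singleton] at hac
              subst hac
              exact hm ha
            exact h.append (List.nodup_singleton c) hdisj
          rw [ih (S ++ [c]) hnd, List.append_assoc]
          rfl
      · rw [if_neg (by simp [hc])]
        have hstep : bstep (false, S) c = (false, S) := by simp [bstep, hc]
        rw [hstep, ih S h]

theorem alt_spec (source : List Int) :
    count_repetition_alt source =
      !decide (((((PySem.Set.ofList (nzf source)).map (fun v => (source.count v : Int)))).filter
          (fun c => decide (1 < c))).Nodup) := by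
  unfold count_repetition_alt
  change ((source.foldl
      (fun (d : PySem.Dict Int Int) v => if v ≠ 0 then d.insert v (d.getD v 0 + 1) else d)
      PySem.Dict.empty).values.foldl bstep (false, PySem.Set.empty)).1 = _
  rw [foldl_if_filter]
  rw [PySem.Dict.foldl_insert_getD_add_one_eq_counter (nzf source)]
  have hvals : (PySem.Dict.counter (nzf source)).values =
      (PySem.Set.ofList (nzf source)).map (fun v => (source.count v : Int)) := by
    have hitems := PySem.Dict.items_counter (κ := Int) (nzf source)
    have : (PySem.Dict.counter (nzf source)).values =
        ((PySem.Set.ofList (nzf source)).map (fun k => (k, ((nzf source).count k : Int)))).map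
          Prod.snd := by
      show (PySem.Dict.counter (nzf source)).items.map Prod.snd = _
      rw [hitems]
    rw [this, List.map_map]
    apply List.map_congr_left
    intro v hv
    rw [PySem.Set.mem_ofList] at hv
    have hv0 : v ≠ 0 := by
      have := List.mem_filter.mp hv
      simpa using this.2
    simp [Function.comp, count_nzf v hv0]
  rw [hvals]
  have hempty : (PySem.Set.empty : PySem.Set Int) = [] := rfl
  rw [hempty, bloop_spec _ [] List.nodup_nil]
  simp


-- ===== VERDICT (by name: the statement is the Claim_ definition above) =====

theorem count_repetition_spec : Claim_equal_count_repetition := by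
  intro source _
  unfold Spec_count_repetition
  have hperm : List.Perm (nzf (pvSort (pvOuter source))) (nzf (pvOuter source)) := by
    unfold nzf
    exact (pvSort_perm (pvOuter source)).filter _
  have hA : count_repetition source = true ↔
      ¬ (nzf (pvOuter source)).Nodup := by
    unfold count_repetition
    rw [pvScan_iff _ (pvSort_sorted _)]
    rw [hperm.nodup_iff]
  have hB : count_repetition_alt source = true ↔
      ¬ (nzf (pvOuter source)).Nodup := by
    rw [alt_spec]
    unfold nzf
    rw [outer_spec source]
    unfold nzf
    simp
  rw [Bool.eq_iff_iff, hA, hB]
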